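-- pv_equiv track=rewrite | github.com/rouabhiamohamed/AMS_Sujet3 | AMS_PROJET/TP final/Relations_Token.py | detect_cooccurrences
-- ===== SOURCE A (Python) =====
-- from collections import defaultdict
-- from itertools import combinations
--
-- CO_OCCURRENCE_DISTANCE = 25
--
-- def detect_cooccurrences(tokens, resolved_entities):
--     entity_positions = defaultdict(list)
--     for i, token in enumerate(tokens):
--         for group in resolved_entities:
--             if token in group:
--                 entity_positions[group].append(i)
--
--     cooccurrences = {}
--     for entity1, entity2 in combinations(entity_positions.keys(), 2):
--         for pos1 in entity_positions[entity1]: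
--             for pos2 in entity_positions[entity2]:
--                 if abs(pos1 - pos2) <= CO_OCCURRENCE_DISTANCE:
--                     cooccurrences[entity1] = entity2
--     return cooccurrences
-- ===== SOURCE B (Python) =====
-- CO_OCCURRENCE_DISTANCE = 25
--
-- def _within_distance(ps, qs):
--     # ps and qs are non-decreasing position lists; two-pointer existence check
--     i = j = 0
--     while i < len(ps) and j < len(qs):
--         if abs(ps[i] - qs[j]) <= CO_OCCURRENCE_DISTANCE:
--             return True
--         if ps[i] < qs[j]:
--             i += 1
--         else:
--             j += 1
--     return False
--
-- def detect_cooccurrences(tokens, resolved_entities):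
--     # token -> groups containing it (one entry per occurrence of the group in
--     # resolved_entities, in that order), built once
--     token_groups = {}
--     for group in resolved_entities:
--         for t in dict.fromkeys(group):
--             token_groups.setdefault(t, []).append(group)
--     positions = {}
--     for i, tok in enumerate(tokens):
--         for group in token_groups.get(tok, ()):
--             positions.setdefault(group, []).append(i)
--     cooccurrences = {}
--     rest = list(positions)
--     while rest:
--         ga, rest = rest[0], rest[1:]
--         pa = positions[ga]
--         for gb in rest:
--             if _within_distance(pa, positions[gb]):
--                 cooccurrences[ga] = gb
--     return cooccurrences
-- ===== Notes on version B (the rewrite author's own statement) =====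
-- stated objective: faster
-- what changed: B builds a token-to-groups index once instead of scanning every group for every token, and replaces A's exhaustive position-pair double loop per entity pair with an early-exit two-pointer existence check on the sorted position lists.
import Mathlib
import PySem

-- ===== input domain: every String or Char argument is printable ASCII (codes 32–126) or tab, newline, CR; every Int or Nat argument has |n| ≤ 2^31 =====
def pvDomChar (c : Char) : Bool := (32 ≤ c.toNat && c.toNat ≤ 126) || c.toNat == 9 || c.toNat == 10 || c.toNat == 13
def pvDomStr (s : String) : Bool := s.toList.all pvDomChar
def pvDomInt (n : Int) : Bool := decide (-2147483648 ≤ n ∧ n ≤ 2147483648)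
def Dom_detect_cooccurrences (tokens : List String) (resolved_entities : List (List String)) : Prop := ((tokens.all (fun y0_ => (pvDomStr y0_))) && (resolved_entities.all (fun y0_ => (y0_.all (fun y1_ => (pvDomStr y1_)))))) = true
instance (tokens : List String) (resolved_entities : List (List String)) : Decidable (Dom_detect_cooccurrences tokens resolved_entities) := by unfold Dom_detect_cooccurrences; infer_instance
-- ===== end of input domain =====

-- B replaces A's per-token scan over every group by a token→groups index built once,
-- and A's full position-pair scan by an early-exit two-pointer check on the sorted lists.
-- Return-value equivalence; neither program mutates its arguments.

-- ===== PORT A =====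
def detect_cooccurrences (tokens : List String) (resolved_entities : List (List String)) :
    List (List String × List String) :=
  -- entity_positions: defaultdict(list); groups (Python tuples) are the keys
  let entity_positions : PySem.Dict (List String) (List Int) :=
    (PySem.List.enumerate tokens).foldl (fun d p =>
      resolved_entities.foldl (fun d group =>
        if group.contains p.2 then d.modify group [] (· ++ [p.1]) else d) d)
      PySem.Dict.empty
  let cooccurrences : PySem.Dict (List String) (List String) :=
    (PySem.List.combinations entity_positions.keys 2).foldl (fun co c =>
      match c with
      | entity1 :: entity2 :: _ =>
        (entity_positions.getD entity1 []).foldl (fun co pos1 =>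
          (entity_positions.getD entity2 []).foldl (fun co pos2 =>
            if (pos1 - pos2).natAbs ≤ 25 then co.insert entity1 entity2 else co) co) co
      | [] => co    -- unreachable: combinations(_, 2) yields two-element lists
      | [_] => co)  -- unreachable
      PySem.Dict.empty
  cooccurrences.items

-- ===== PORT B =====
-- two-pointer existence check over two non-decreasing position lists (Source B _within_distance)
def withinDistance : List Int → List Int → Bool
  | [], _ => false
  | _ :: _, [] => false
  | p :: ps, q :: qs =>
    if (p - q).natAbs ≤ 25 then true
    else if p < q then withinDistance ps (q :: qs)
    else withinDistance (p :: ps) qs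
termination_by ps qs => ps.length + qs.length

-- Source B's `while rest:` suffix loop over the key list
def pairLoop (positions : PySem.Dict (List String) (List Int)) :
    List (List String) → PySem.Dict (List String) (List String) →
      PySem.Dict (List String) (List String)
  | [], co => co
  | ga :: rest, co =>
    pairLoop positions rest
      (rest.foldl (fun co gb =>
        if withinDistance (positions.getD ga []) (positions.getD gb []) then
          co.insert ga gb
        else co) co)

def detect_cooccurrences_alt (tokens : List String) (resolved_entities : List (List String)) :
    List (List String × List String) :=
  -- token -> groups containing it, built once (dict.fromkeys = PySem.List.dedup)
  let token_groups : PySem.Dict String (List (List String)) :=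
    resolved_entities.foldl (fun d group =>
      (PySem.List.dedup group).foldl (fun d t => d.modify t [] (· ++ [group])) d)
      PySem.Dict.empty
  let positions : PySem.Dict (List String) (List Int) :=
    (PySem.List.enumerate tokens).foldl (fun d p =>
      (token_groups.getD p.2 []).foldl (fun d group => d.modify group [] (· ++ [p.1])) d)
      PySem.Dict.empty
  (pairLoop positions positions.keys PySem.Dict.empty).items

-- ===== PRECONDITION & SPEC =====
def Spec_detect_cooccurrences (tokens : List String) (resolved_entities : List (List String)) (out : List (List String × List String)) : Prop := out = detect_cooccurrences_alt tokens resolved_entities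
instance (tokens : List String) (resolved_entities : List (List String)) (out : List (List String × List String)) : Decidable (Spec_detect_cooccurrences tokens resolved_entities out) := by unfold Spec_detect_cooccurrences; infer_instance

-- ===== CLAIM (what is proved, stated in full; the proofs are below) =====
def Claim_equal_detect_cooccurrences : Prop := ∀ (tokens : List String) (resolved_entities : List (List String)), Dom_detect_cooccurrences tokens resolved_entities → Spec_detect_cooccurrences tokens resolved_entities (detect_cooccurrences tokens resolved_entities)

-- ===== LEMMAS AND PROOFS =====

-- a Nodup list filtered to one value
theorem filter_beq_of_nodup {α : Type} [DecidableEq α] (l : List α) (hl : l.Nodup) (t : α) :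
    l.filter (· == t) = if t ∈ l then [t] else [] := by
  induction l with
  | nil => simp
  | cons x xs ih =>
    rcases List.nodup_cons.mp hl with ⟨hx, hxs⟩
    by_cases hxt : x = t
    · subst hxt; simp [ih hxs, hx]
    · have ht : t ≠ x := fun h => hxt h.symm
      simp [hxt, ih hxs, ht]

-- one group's pass over token_groups appends the group to each of its tokens' entries
theorem tg_inner (g : List String) (d : PySem.Dict String (List (List String))) (t : String) :
    ((PySem.List.dedup g).foldl (fun d u => d.modify u [] (· ++ [g])) d).getD t []
      = d.getD t [] ++ (if g.contains t then [g] else []) := by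
  have h1 : (PySem.List.dedup g).foldl (fun d u => d.modify u [] (· ++ [g])) d
      = ((PySem.List.dedup g).map (fun u => (u, g))).foldl
          (fun d p => d.modify p.1 [] (· ++ [p.2])) d := by
    rw [List.foldl_map]
  rw [h1, PySem.Dict.getD_foldl_modify_append, List.filter_map, List.map_map]
  have h2 : ((PySem.List.dedup g).filter ((fun p => p.1 == t) ∘ fun u => (u, g)))
      = (PySem.List.dedup g).filter (· == t) := rfl
  rw [h2, filter_beq_of_nodup _ (PySem.List.nodup_dedup g) t]
  by_cases hm : t ∈ g
  · simp [hm]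
  · simp [hm]

-- token_groups maps t to exactly the groups containing t, in resolved_entities order
theorem tg_getD (res : List (List String)) (d : PySem.Dict String (List (List String)))
    (t : String) :
    (res.foldl (fun d group =>
        (PySem.List.dedup group).foldl (fun d u => d.modify u [] (· ++ [group])) d) d).getD t []
      = d.getD t [] ++ res.filter (fun g => g.contains t) := by
  induction res generalizing d with
  | nil => simp
  | cons g gs ih =>
    rw [List.foldl_cons, ih, tg_inner, List.filter_cons]
    by_cases hc : t ∈ g
    · simp [hc]
    · simp [hc]

-- A's entity_positions and B's positions are the same dict
theorem pos_eq (tokens : List String) (resolved_entities : List (List String)) :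
    (PySem.List.enumerate tokens).foldl (fun d p =>
      resolved_entities.foldl (fun d group =>
        if group.contains p.2 then d.modify group [] (· ++ [p.1]) else d) d)
      PySem.Dict.empty
    = (PySem.List.enumerate tokens).foldl (fun d p =>
        ((resolved_entities.foldl (fun d group =>
            (PySem.List.dedup group).foldl (fun d t => d.modify t [] (· ++ [group])) d)
          PySem.Dict.empty).getD p.2 []).foldl
          (fun d group => d.modify group [] (· ++ [p.1])) d)
        PySem.Dict.empty := by
  have hstep : ∀ (d : PySem.Dict (List String) (List Int)) (p : Int × String),
      ((resolved_entities.foldl (fun d group =>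
            (PySem.List.dedup group).foldl (fun d t => d.modify t [] (· ++ [group])) d)
          PySem.Dict.empty).getD p.2 []).foldl
          (fun d group => d.modify group [] (· ++ [p.1])) d
      = resolved_entities.foldl (fun d group =>
          if group.contains p.2 then d.modify group [] (· ++ [p.1]) else d) d := by
    intro d p
    rw [tg_getD]
    simp only [PySem.Dict.getD_empty, List.nil_append]
    rw [List.foldl_filter]
  simp only [hstep]

-- one token's pass keeps every position list non-decreasing and bounded by its index
theorem sorted_inner (res : List (List String)) (c : List String → Bool) (i : Int)
    (d : PySem.Dict (List String) (List Int))
    (h : ∀ g, ((d.getD g []).Pairwise (· ≤ ·)) ∧ ∀ x ∈ d.getD g [], x ≤ i) :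
    ∀ g, (((res.foldl (fun d group =>
        if c group then d.modify group [] (· ++ [i]) else d) d).getD g []).Pairwise (· ≤ ·))
      ∧ ∀ x ∈ (res.foldl (fun d group =>
        if c group then d.modify group [] (· ++ [i]) else d) d).getD g [], x ≤ i := by
  induction res generalizing d with
  | nil => exact h
  | cons g' gs ih =>
    rw [List.foldl_cons]
    apply ih
    intro g
    by_cases hc : c g'
    · simp only [hc, if_true, PySem.Dict.getD_modify]
      by_cases hg : g = g'
      · subst hg
        rw [if_pos rfl]
        refine ⟨?_, ?_⟩
        · rw [List.pairwise_append]
          exact ⟨(h g).1, by simp, fun a ha b hb => by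
            simp at hb; subst hb; exact (h g).2 a ha⟩
        · intro x hx
          rcases List.mem_append.mp hx with hx | hx
          · exact (h g).2 x hx
          · simp at hx; omega
      · simp only [if_neg hg]; exact h g
    · simp only [hc]; exact h g

theorem sorted_outer (res : List (List String)) (tokens : List String) (s : Int)
    (d : PySem.Dict (List String) (List Int))
    (h : ∀ g, ((d.getD g []).Pairwise (· ≤ ·)) ∧ ∀ x ∈ d.getD g [], x < s) (g : List String) :
    (((PySem.List.enumerate tokens s).foldl (fun d p =>
        res.foldl (fun d group =>
          if group.contains p.2 then d.modify group [] (· ++ [p.1]) else d) d) d).getD g []).Pairwise (· ≤ ·) := by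
  induction tokens generalizing s d with
  | nil => rw [PySem.List.enumerate_nil, List.foldl_nil]; exact (h g).1
  | cons tok toks ih =>
    rw [PySem.List.enumerate_cons, List.foldl_cons]
    apply ih
    intro g'
    have := sorted_inner res (fun group => group.contains tok) s d
      (fun g0 => ⟨(h g0).1, fun x hx => le_of_lt ((h g0).2 x hx)⟩) g'
    exact ⟨this.1, fun x hx => lt_of_le_of_lt (this.2 x hx) (by omega)⟩

-- every position list of A's entity_positions is non-decreasing
theorem pos_sorted (tokens : List String) (resolved_entities : List (List String)) (g : List String) :
    (((PySem.List.enumerate tokens).foldl (fun d p =>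
        resolved_entities.foldl (fun d group =>
          if group.contains p.2 then d.modify group [] (· ++ [p.1]) else d) d)
        PySem.Dict.empty).getD g []).Pairwise (· ≤ ·) := by
  exact sorted_outer resolved_entities tokens 0 PySem.Dict.empty (fun g0 => by simp) g

-- on sorted lists the two-pointer check decides existence of a close pair
theorem within_eq (pa pb : List Int) (ha : pa.Pairwise (· ≤ ·)) (hb : pb.Pairwise (· ≤ ·)) :
    withinDistance pa pb
      = pa.any (fun p => pb.any (fun q => decide ((p - q).natAbs ≤ 25))) := by
  fun_induction withinDistance pa pb with
  | case1 pb => simp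
  | case2 p ps => simp
  | case3 p ps q qs hclose => simp [hclose]
  | case4 p ps q qs hclose hlt ih =>
    rw [ih (List.Pairwise.sublist (List.sublist_cons_self p ps) ha) hb]
    have hp : ∀ q', q' = q ∨ q' ∈ qs → ¬ ((p - q').natAbs ≤ 25) := by
      intro q' hq'
      rcases hq' with h | h
      · subst h; omega
      · have := (List.pairwise_cons.mp hb).1 q' h
        omega
    rw [Bool.eq_iff_iff]
    simp only [List.any_eq_true, List.mem_cons, decide_eq_true_eq]
    constructor
    · rintro ⟨p', hp', hq⟩; exact ⟨p', Or.inr hp', hq⟩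
    · rintro ⟨p', hp' | hp', q', hq', hcl⟩
      · subst hp'; exact absurd hcl (hp q' hq')
      · exact ⟨p', hp', q', hq', hcl⟩
  | case5 p ps q qs hclose hlt ih =>
    rw [ih ha (List.Pairwise.sublist (List.sublist_cons_self q qs) hb)]
    have hq : ∀ p', p' = p ∨ p' ∈ ps → ¬ ((p' - q).natAbs ≤ 25) := by
      intro p' hp'
      rcases hp' with h | h
      · subst h; omega
      · have := (List.pairwise_cons.mp ha).1 p' h
        omega
    rw [Bool.eq_iff_iff]
    simp only [List.any_eq_true, List.mem_cons, decide_eq_true_eq]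
    constructor
    · rintro ⟨p', hp', q', hq', hcl⟩; exact ⟨p', hp', q', Or.inr hq', hcl⟩
    · rintro ⟨p', hp', q', hq' | hq', hcl⟩
      · subst hq'; exact absurd hcl (hq p' hp')
      · exact ⟨p', hp', q', hq', hcl⟩

-- A's inner position loop collapses to one conditional insert
theorem fold_insert_pb (ga gb : List String) (p1 : Int) (pb : List Int)
    (co : PySem.Dict (List String) (List String)) :
    pb.foldl (fun co p2 =>
        if (p1 - p2).natAbs ≤ 25 then co.insert ga gb else co) co
      = if pb.any (fun q => decide ((p1 - q).natAbs ≤ 25)) then co.insert ga gb else co := by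
  induction pb generalizing co with
  | nil => simp
  | cons q qs ih =>
    rw [List.foldl_cons, ih, List.any_cons]
    by_cases h : (p1 - q).natAbs ≤ 25
    · simp [h, PySem.Dict.insert_insert_self]
    · simp [h]

theorem fold_insert_pa (ga gb : List String) (pa pb : List Int)
    (co : PySem.Dict (List String) (List String)) :
    pa.foldl (fun co p1 =>
        pb.foldl (fun co p2 =>
          if (p1 - p2).natAbs ≤ 25 then co.insert ga gb else co) co) co
      = if pa.any (fun p => pb.any (fun q => decide ((p - q).natAbs ≤ 25))) then
          co.insert ga gb
        else co := by
  induction pa generalizing co with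
  | nil => simp
  | cons p ps ih =>
    rw [List.foldl_cons, fold_insert_pb, ih, List.any_cons]
    by_cases h : pb.any (fun q => decide ((p - q).natAbs ≤ 25))
    · simp only [h, if_true, Bool.true_or, if_true]
      by_cases h2 : ps.any (fun p => pb.any (fun q => decide ((p - q).natAbs ≤ 25)))
      · simp [h2, PySem.Dict.insert_insert_self]
      · simp [h2]
    · simp [h]

-- A's fold over combinations(keys, 2) is B's suffix loop
theorem comb_pair (pos : PySem.Dict (List String) (List Int))
    (hs : ∀ g, (pos.getD g []).Pairwise (· ≤ ·)) (ks : List (List String))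
    (co : PySem.Dict (List String) (List String)) :
    (PySem.List.combinations ks 2).foldl (fun co c =>
        match c with
        | entity1 :: entity2 :: _ =>
          (pos.getD entity1 []).foldl (fun co pos1 =>
            (pos.getD entity2 []).foldl (fun co pos2 =>
              if (pos1 - pos2).natAbs ≤ 25 then co.insert entity1 entity2 else co) co) co
        | [] => co
        | [_] => co) co
      = pairLoop pos ks co := by
  induction ks generalizing co with
  | nil =>
    rw [show (2 : Nat) = 1 + 1 from rfl, PySem.List.combinations_nil_succ]
    rfl
  | cons x xs ih =>
    rw [show (2 : Nat) = 1 + 1 from rfl, PySem.List.combinations_cons_succ,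
      PySem.List.combinations_one, List.foldl_append, List.foldl_map, List.foldl_map]
    rw [show (1 + 1 : Nat) = 2 from rfl, ih]
    show pairLoop pos xs _ = pairLoop pos (x :: xs) co
    rw [pairLoop]
    congr 1
    apply List.foldl_ext
    intro co' y hy
    dsimp only
    rw [within_eq _ _ (hs x) (hs y), fold_insert_pa]

-- ===== VERDICT (by name: the statement is the Claim_ definition above) =====
theorem detect_cooccurrences_spec : Claim_equal_detect_cooccurrences := by
  intro tokens resolved_entities _
  unfold Spec_detect_cooccurrences detect_cooccurrences detect_cooccurrences_alt
  dsimp only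
  rw [← pos_eq tokens resolved_entities]
  rw [comb_pair _ (fun g => pos_sorted tokens resolved_entities g)]
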